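-- pv_equiv track=rewrite | github.com/milairhu/helltaker_solver | SAT/SAT_Helltaker.py | variable_to_cell
-- ===== SOURCE A (Python) =====
-- from typing import List, Tuple
--
-- def variable_to_cell(var: int,largeur:int, hauteur:int, nbCoupsInit : int) -> Tuple[ int, int, int, int]: #(i,j,CodeCase,NbCoups)
--     v=4*nbCoupsInit
--     for i in range (0,hauteur):
--         for j in range (0,largeur):
--             for z in range (0,9+1+1):
--                 for c in range(0, nbCoupsInit + 1):
--                     v=v+1
--                     if (v==var):
--                         return (i,j,z,c)
--     return (-1,-1,-1,-1)
-- ===== SOURCE B (Python) =====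
-- def variable_to_cell(var: int, largeur: int, hauteur: int, nbCoupsInit: int):
--     # O(1) arithmetic inversion of the linear variable numbering.
--     m = nbCoupsInit + 1
--     idx = var - 4 * nbCoupsInit - 1
--     if hauteur <= 0 or largeur <= 0 or m <= 0 or idx < 0 or idx >= hauteur * largeur * 11 * m:
--         return (-1, -1, -1, -1)
--     rest, c = divmod(idx, m)
--     rest, z = divmod(rest, 11)
--     i, j = divmod(rest, largeur)
--     return (i, j, z, c)
-- ===== Notes on version B (the rewrite author's own statement) =====
-- stated objective: faster
-- what changed: replaced the quadruple-nested linear search over all (i,j,z,c) cells with a closed-form arithmetic inversion using divmod over the nested dimensions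
import Mathlib
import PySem

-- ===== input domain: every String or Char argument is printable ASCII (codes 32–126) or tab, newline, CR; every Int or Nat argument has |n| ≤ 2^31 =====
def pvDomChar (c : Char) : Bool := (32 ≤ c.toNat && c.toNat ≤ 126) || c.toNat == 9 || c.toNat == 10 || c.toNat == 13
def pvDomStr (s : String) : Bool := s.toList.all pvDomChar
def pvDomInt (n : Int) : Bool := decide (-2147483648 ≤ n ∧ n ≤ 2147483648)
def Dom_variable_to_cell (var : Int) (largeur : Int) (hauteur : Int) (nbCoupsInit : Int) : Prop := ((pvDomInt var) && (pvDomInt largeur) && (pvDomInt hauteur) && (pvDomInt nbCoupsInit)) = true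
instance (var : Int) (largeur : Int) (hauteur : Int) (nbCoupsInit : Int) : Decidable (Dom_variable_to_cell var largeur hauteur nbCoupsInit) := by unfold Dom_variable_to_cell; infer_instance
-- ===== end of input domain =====

-- B replaces A's quadruple-nested linear search with an O(1) closed-form divmod inversion of the linear cell numbering.


-- ===== PORT A =====
-- Generic early-return for-loop: runs the body f (threading the counter v) over the
-- index list, stopping as soon as the body returns a value — the shape of each of A's
-- four 'for … return' loops.
def pvLoop {T : Type} (f : Int → Int → Int × Option T) : Int → List Int → Int × Option T
  | v, [] => (v, none)
  | v, k :: ks =>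
    match f v k with
    | (v', some r) => (v', some r)
    | (v', none) => pvLoop f v' ks

def variable_to_cell (var : Int) (largeur : Int) (hauteur : Int) (nbCoupsInit : Int) : Int × Int × Int × Int :=
  let v0 := 4 * nbCoupsInit
  match pvLoop (fun v i =>
          pvLoop (fun v j =>
            pvLoop (fun v z =>
              pvLoop (fun v c =>
                let v' := v + 1
                if v' = var then (v', some (i, j, z, c)) else (v', none))
                v (PySem.List.pyRange 0 (nbCoupsInit + 1) 1))
              v (PySem.List.pyRange 0 (9 + 1 + 1) 1))
            v (PySem.List.pyRange 0 largeur 1))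
          v0 (PySem.List.pyRange 0 hauteur 1) with
  | (_, some r) => r
  | (_, none) => (-1, -1, -1, -1)

-- ===== PORT B =====
def variable_to_cell_alt (var : Int) (largeur : Int) (hauteur : Int) (nbCoupsInit : Int) : Int × Int × Int × Int :=
  let m := nbCoupsInit + 1
  let idx := var - 4 * nbCoupsInit - 1
  if hauteur ≤ 0 ∨ largeur ≤ 0 ∨ m ≤ 0 ∨ idx < 0 ∨ hauteur * largeur * 11 * m ≤ idx then
    (-1, -1, -1, -1)
  else
    let r1 := PySem.Int.floordiv idx m
    let c := PySem.Int.mod idx m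
    let r2 := PySem.Int.floordiv r1 11
    let z := PySem.Int.mod r1 11
    let i := PySem.Int.floordiv r2 largeur
    let j := PySem.Int.mod r2 largeur
    (i, j, z, c)

-- ===== PRECONDITION & SPEC =====
def Spec_variable_to_cell (var : Int) (largeur : Int) (hauteur : Int) (nbCoupsInit : Int) (out : Int × Int × Int × Int) : Prop := out = variable_to_cell_alt var largeur hauteur nbCoupsInit
instance (var : Int) (largeur : Int) (hauteur : Int) (nbCoupsInit : Int) (out : Int × Int × Int × Int) : Decidable (Spec_variable_to_cell var largeur hauteur nbCoupsInit out) := by unfold Spec_variable_to_cell; infer_instance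

-- ===== CLAIM (what is proved, stated in full; the proofs are below) =====
def Claim_equal_variable_to_cell : Prop := ∀ (var : Int) (largeur : Int) (hauteur : Int) (nbCoupsInit : Int), Dom_variable_to_cell var largeur hauteur nbCoupsInit → Spec_variable_to_cell var largeur hauteur nbCoupsInit (variable_to_cell var largeur hauteur nbCoupsInit)

-- ===== LEMMAS AND PROOFS =====

-- Characterisation of an early-return loop whose body consumes a fixed block of B
-- counter values per index: it fires exactly when var lies within the consumed window,
-- and the found index/offset are given by division with remainder.
theorem pvLoop_eq {T : Type} (f : Int → Int → Int × Option T) (var B : Int) (out : Int → Int → T)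
    (hB : 0 ≤ B)
    (hf : ∀ v k, f v k = if 0 < var - v ∧ var - v ≤ B then (var, some (out k (var - v - 1))) else (v + B, none)) :
    ∀ (n : Nat) (a b v : Int), (b - a).toNat = n →
      pvLoop f v (PySem.List.pyRange a b 1) =
        if 0 < var - v ∧ var - v ≤ max (b - a) 0 * B then
          (var, some (out (a + (var - v - 1) / B) ((var - v - 1) % B)))
        else (v + max (b - a) 0 * B, none) := by
  intro n
  induction n with
  | zero =>
    intro a b v hn
    have hba : b ≤ a := by omega
    rw [PySem.List.pyRange_one_eq_nil hba]
    have : max (b - a) 0 = 0 := by omega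
    rw [this]
    simp [pvLoop]
  | succ n ih =>
    intro a b v hn
    have hab : a < b := by omega
    rw [PySem.List.pyRange_one_cons hab]
    have hmax : max (b - a) 0 = b - a := by omega
    have hmax' : max (b - (a + 1)) 0 = b - a - 1 := by omega
    show pvLoop f v (a :: PySem.List.pyRange (a+1) b 1) = _
    rw [show pvLoop f v (a :: PySem.List.pyRange (a+1) b 1) =
        (match f v a with
         | (v', some r) => (v', some r)
         | (v', none) => pvLoop f v' (PySem.List.pyRange (a+1) b 1)) from rfl]
    rw [hf v a]
    by_cases h1 : 0 < var - v ∧ var - v ≤ B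
    · -- found at index a
      rw [if_pos h1]
      have hBpos : 0 < B := by omega
      have hcond : 0 < var - v ∧ var - v ≤ max (b - a) 0 * B := by
        refine ⟨h1.1, ?_⟩
        have h2 : (1:Int) ≤ max (b - a) 0 := by omega
        calc var - v ≤ B := h1.2
          _ = 1 * B := (one_mul B).symm
          _ ≤ max (b - a) 0 * B := by
              exact mul_le_mul_of_nonneg_right h2 hB
      rw [if_pos hcond]
      have hd0 : (0:Int) ≤ var - v - 1 := by omega
      have hdB : var - v - 1 < B := by omega
      rw [Int.ediv_eq_zero_of_lt hd0 hdB, Int.emod_eq_of_lt hd0 hdB]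
      simp
    · -- not found at a: recurse with v + B
      rw [if_neg h1]
      simp only []
      rw [ih (a+1) b (v + B) (by omega)]
      rw [hmax, hmax']
      by_cases h2 : 0 < var - v ∧ var - v ≤ (b - a) * B
      · rw [if_pos h2]
        -- since not found at a and 0 < var - v, we have B < var - v
        have hBlt : B < var - v := by
          rcases h1 with h1
          push_neg at h1
          rcases h2 with ⟨h2a, _⟩
          have := h1 h2a
          omega
        have hBpos : 0 < B := by
          by_contra hB0
          push_neg at hB0
          have hB0' : B = 0 := le_antisymm hB0 hB
          rw [hB0', mul_zero] at h2
          omega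
        have hcond' : 0 < var - (v + B) ∧ var - (v + B) ≤ (b - a - 1) * B := by
          constructor
          · omega
          · have : (b - a - 1) * B = (b - a) * B - B := by ring
            omega
        rw [if_pos hcond']
        -- index and offset shift
        have hd : var - (v + B) - 1 = (var - v - 1) - B := by ring
        have hdiv : ((var - v - 1) - B) / B = (var - v - 1) / B - 1 := by
          have h := Int.add_mul_ediv_right ((var - v - 1) - B) 1 (by omega : B ≠ 0)
          rw [one_mul] at h
          have h2' : (var - v - 1) - B + B = var - v - 1 := by ring
          rw [h2'] at h
          omega
        have hmod : ((var - v - 1) - B) % B = (var - v - 1) % B := Int.sub_emod_right _ _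
        rw [hd, hdiv, hmod]
        have : a + 1 + ((var - v - 1) / B - 1) = a + (var - v - 1) / B := by ring
        rw [this]
      · rw [if_neg h2]
        have hcond' : ¬ (0 < var - (v + B) ∧ var - (v + B) ≤ (b - a - 1) * B) := by
          intro ⟨ha', hb'⟩
          apply h2
          constructor
          · omega
          · have : (b - a - 1) * B = (b - a) * B - B := by ring
            omega
        rw [if_neg hcond']
        have : v + B + (b - a - 1) * B = v + (b - a) * B := by ring
        rw [this]

-- Mixed-radix extraction identities relating A's top-down mod/div chain to B's
-- bottom-up divmod chain, for 0 ≤ d.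
theorem mixed_radix (d l m : Int) (hl : 0 < l) (hm : 0 < m) :
    ((d % (l * (11 * m))) % (11 * m)) % m = d % m ∧
    ((d % (l * (11 * m))) % (11 * m)) / m = (d / m) % 11 ∧
    (d % (l * (11 * m))) / (11 * m) = (d / m / 11) % l ∧
    d / (l * (11 * m)) = d / m / 11 / l := by
  have h11m : (0:Int) < 11 * m := by positivity
  have hW : (0:Int) < l * (11 * m) := by positivity
  -- abbreviations
  set W := l * (11 * m) with hWdef
  have hdvd1 : (11 * m : Int) ∣ W := ⟨l, by ring⟩
  have hdvd2 : (m : Int) ∣ (11 * m) := ⟨11, by ring⟩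
  have e1 : (d % W) % (11 * m) = d % (11 * m) := Int.emod_emod_of_dvd d hdvd1
  have e2 : d % (11 * m) % m = d % m := Int.emod_emod_of_dvd d hdvd2
  refine ⟨by rw [e1, e2], ?_, ?_, ?_⟩
  · -- (d % (11*m)) / m = (d / m) % 11
    rw [e1]
    have hdec : d = d % (11 * m) + (d / (11 * m)) * (11 * m) := by
      have := Int.ediv_mul_add_emod d (11 * m)
      omega
    have hr0 : 0 ≤ d % (11 * m) := Int.emod_nonneg d (by omega)
    have hrlt : d % (11 * m) < 11 * m := Int.emod_lt_of_pos d h11m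
    have hdm : d / m = d % (11 * m) / m + (d / (11 * m)) * 11 := by
      conv_lhs => rw [hdec]
      have : d % (11 * m) + d / (11 * m) * (11 * m) = d % (11 * m) + (d / (11 * m) * 11) * m := by ring
      rw [this, Int.add_mul_ediv_right _ _ (by omega : m ≠ 0)]
    rw [hdm]
    have h1 : (d % (11 * m) / m + 11 * (d / (11 * m))) % 11 = (d % (11 * m) / m) % 11 :=
      Int.add_mul_emod_self_left _ _ _
    have h2 : d % (11 * m) / m + d / (11 * m) * 11 = d % (11 * m) / m + 11 * (d / (11 * m)) := by ring
    rw [h2, h1]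
    have hq0 : 0 ≤ d % (11 * m) / m := Int.ediv_nonneg hr0 (by omega)
    have hqlt : d % (11 * m) / m < 11 := by
      rw [Int.ediv_lt_iff_lt_mul hm]
      omega
    exact (Int.emod_eq_of_lt hq0 hqlt).symm
  · -- (d % W) / (11*m) = (d / m / 11) % l
    have hdec : d = d % W + (d / W) * W := by
      have := Int.ediv_mul_add_emod d W
      omega
    have hr0 : 0 ≤ d % W := Int.emod_nonneg d (by omega)
    have hrlt : d % W < W := Int.emod_lt_of_pos d hW
    have hstep : d / m / 11 = d % W / (11 * m) + (d / W) * l := by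
      have hdm : d / m = d % W / m + (d / W) * (l * 11) := by
        conv_lhs => rw [hdec]
        have : d % W + d / W * W = d % W + (d / W * (l * 11)) * m := by rw [hWdef]; ring
        rw [this, Int.add_mul_ediv_right _ _ (by omega : m ≠ 0)]
      rw [hdm]
      have : d % W / m + d / W * (l * 11) = d % W / m + (d / W * l) * 11 := by ring
      rw [this, Int.add_mul_ediv_right _ _ (by omega : (11:Int) ≠ 0)]
      have h1111 : d % W / m / 11 = d % W / (11 * m) := by
        rw [Int.ediv_ediv_eq_ediv_mul, mul_comm m 11]
        omega
      rw [h1111]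
    rw [hstep]
    have h2 : d % W / (11 * m) + d / W * l = d % W / (11 * m) + l * (d / W) := by ring
    rw [h2, Int.add_mul_emod_self_left]
    have hq0 : 0 ≤ d % W / (11 * m) := Int.ediv_nonneg hr0 (by omega)
    have hqlt : d % W / (11 * m) < l := by
      rw [Int.ediv_lt_iff_lt_mul h11m]
      have : l * (11 * m) = W := hWdef.symm
      omega
    exact (Int.emod_eq_of_lt hq0 hqlt).symm
  · -- d / W = d / m / 11 / l
    rw [Int.ediv_ediv_eq_ediv_mul, Int.ediv_ediv_eq_ediv_mul, hWdef]
    · ring_nf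
    · omega
    · positivity

-- ===== VERDICT (by name: the statement is the Claim_ definition above) =====
theorem variable_to_cell_spec : Claim_equal_variable_to_cell := by
  intro var l h n _
  unfold Spec_variable_to_cell
  set m : Int := n + 1 with hm
  set L : Int := max m 0 with hL
  have hL0 : 0 ≤ L := le_max_right _ _
  -- innermost (c) loop: block 1
  have hc : ∀ (i j z v : Int),
      pvLoop (fun v c => let v' := v + 1; if v' = var then (v', some (i, j, z, c)) else (v', none))
        v (PySem.List.pyRange 0 m 1) =
      if 0 < var - v ∧ var - v ≤ L then (var, some (i, j, z, var - v - 1))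
      else (v + L, none) := by
    intro i j z v
    have := pvLoop_eq (fun v c => let v' := v + 1; if v' = var then (v', some (i, j, z, c)) else (v', none))
      var 1 (fun k _ => (i, j, z, k)) (by omega)
      (by
        intro v k
        simp only []
        by_cases hv : v + 1 = var
        · rw [if_pos hv, if_pos (by omega)]
          rw [hv]
        · rw [if_neg hv, if_neg (by omega)])
      (m - 0).toNat 0 m v rfl
    rw [this]
    have hmax : max (m - 0) 0 * 1 = L := by omega
    rw [hmax]
    by_cases hcond : 0 < var - v ∧ var - v ≤ L
    · rw [if_pos hcond, if_pos hcond]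
      have hd0 : (0:Int) ≤ var - v - 1 := by omega
      rw [Int.ediv_one, Int.emod_one]
      simp
    · rw [if_neg hcond, if_neg hcond]
  -- z loop: block L, 11 iterations
  have hz : ∀ (i j v : Int),
      pvLoop (fun v z =>
        pvLoop (fun v c => let v' := v + 1; if v' = var then (v', some (i, j, z, c)) else (v', none))
          v (PySem.List.pyRange 0 m 1))
        v (PySem.List.pyRange 0 (9 + 1 + 1) 1) =
      if 0 < var - v ∧ var - v ≤ 11 * L then
        (var, some (i, j, (var - v - 1) / L, (var - v - 1) % L))
      else (v + 11 * L, none) := by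
    intro i j v
    have := pvLoop_eq _ var L (fun k d => (i, j, k, d)) hL0
      (by intro v k; exact hc i j k v)
      11 0 (9 + 1 + 1) v (by decide)
    rw [this]
    have hmax : max ((9 + 1 + 1 : Int) - 0) 0 * L = 11 * L := by
      norm_num
    rw [hmax]
    by_cases hcond : 0 < var - v ∧ var - v ≤ 11 * L
    · rw [if_pos hcond, if_pos hcond]
      simp
    · rw [if_neg hcond, if_neg hcond]
  -- j loop: block 11*L, max l 0 iterations
  have hj : ∀ (i v : Int),
      pvLoop (fun v j =>
        pvLoop (fun v z =>
          pvLoop (fun v c => let v' := v + 1; if v' = var then (v', some (i, j, z, c)) else (v', none))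
            v (PySem.List.pyRange 0 m 1))
          v (PySem.List.pyRange 0 (9 + 1 + 1) 1))
        v (PySem.List.pyRange 0 l 1) =
      if 0 < var - v ∧ var - v ≤ max l 0 * (11 * L) then
        (var, some (i, (var - v - 1) / (11 * L),
                    ((var - v - 1) % (11 * L)) / L, ((var - v - 1) % (11 * L)) % L))
      else (v + max l 0 * (11 * L), none) := by
    intro i v
    have := pvLoop_eq _ var (11 * L) (fun k d => (i, k, d / L, d % L)) (by positivity)
      (by intro v k; exact hz i k v)
      (l - 0).toNat 0 l v rfl
    rw [this]
    have hmax : max (l - 0) 0 = max l 0 := by omega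
    rw [hmax]
    by_cases hcond : 0 < var - v ∧ var - v ≤ max l 0 * (11 * L)
    · rw [if_pos hcond, if_pos hcond]
      simp
    · rw [if_neg hcond, if_neg hcond]
  -- i loop: block W := max l 0 * (11*L), max h 0 iterations
  have hi :
      pvLoop (fun v i =>
        pvLoop (fun v j =>
          pvLoop (fun v z =>
            pvLoop (fun v c => let v' := v + 1; if v' = var then (v', some (i, j, z, c)) else (v', none))
              v (PySem.List.pyRange 0 m 1))
            v (PySem.List.pyRange 0 (9 + 1 + 1) 1))
          v (PySem.List.pyRange 0 l 1))
        (4 * n) (PySem.List.pyRange 0 h 1) =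
      if 0 < var - 4 * n ∧ var - 4 * n ≤ max h 0 * (max l 0 * (11 * L)) then
        (var, some ((var - 4 * n - 1) / (max l 0 * (11 * L)),
                    ((var - 4 * n - 1) % (max l 0 * (11 * L))) / (11 * L),
                    (((var - 4 * n - 1) % (max l 0 * (11 * L))) % (11 * L)) / L,
                    (((var - 4 * n - 1) % (max l 0 * (11 * L))) % (11 * L)) % L))
      else (4 * n + max h 0 * (max l 0 * (11 * L)), none) := by
    have := pvLoop_eq _ var (max l 0 * (11 * L))
      (fun k d => (k, d / (11 * L), (d % (11 * L)) / L, (d % (11 * L)) % L))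
      (by positivity)
      (by intro v k; exact hj k v)
      (h - 0).toNat 0 h (4 * n) rfl
    rw [this]
    have hmax : max (h - 0) 0 = max h 0 := by omega
    rw [hmax]
    by_cases hcond : 0 < var - 4 * n ∧ var - 4 * n ≤ max h 0 * (max l 0 * (11 * L))
    · rw [if_pos hcond, if_pos hcond]
      simp
    · rw [if_neg hcond, if_neg hcond]
  -- assemble
  show variable_to_cell var l h n = variable_to_cell_alt var l h n
  unfold variable_to_cell
  simp only []
  rw [hi]
  set d : Int := var - 4 * n - 1 with hd
  by_cases hcond : 0 < var - 4 * n ∧ var - 4 * n ≤ max h 0 * (max l 0 * (11 * L))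
  · rw [if_pos hcond]
    -- positivity of all dimensions
    have hd0 : 0 ≤ d := by omega
    have hdlt : d < max h 0 * (max l 0 * (11 * L)) := by omega
    have hprod : 0 < max h 0 * (max l 0 * (11 * L)) := by omega
    have hh0 : 0 < h := by
      by_contra hh
      push_neg at hh
      have : max h 0 = 0 := by omega
      rw [this, zero_mul] at hprod
      omega
    have hWpos : 0 < max l 0 * (11 * L) := by
      by_contra hw
      push_neg at hw
      have h1 : max h 0 * (max l 0 * (11 * L)) ≤ 0 := by
        have := mul_nonpos_of_nonneg_of_nonpos (by omega : (0:Int) ≤ max h 0) hw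
        exact this
      omega
    have hl0 : 0 < l := by
      by_contra hl
      push_neg at hl
      have : max l 0 = 0 := by omega
      rw [this, zero_mul] at hWpos
      omega
    have hLpos : 0 < L := by
      by_contra hLn
      push_neg at hLn
      have hLeq : L = 0 := by omega
      rw [hLeq, mul_zero, mul_zero] at hWpos
      omega
    have hmpos : 0 < m := by omega
    have hmaxh : max h 0 = h := by omega
    have hmaxl : max l 0 = l := by omega
    have hLm : L = m := by omega
    have hdlt' : d < h * l * 11 * (n + 1) := by
      have he : max h 0 * (max l 0 * (11 * L)) = h * l * 11 * (n + 1) := by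
        rw [hmaxh, hmaxl, hLm, hm]; ring
      omega
    rw [hmaxl, hLm]
    -- B side: guard false
    unfold variable_to_cell_alt
    simp only []
    have hguard : ¬ (h ≤ 0 ∨ l ≤ 0 ∨ n + 1 ≤ 0 ∨ var - 4 * n - 1 < 0 ∨ h * l * 11 * (n + 1) ≤ var - 4 * n - 1) := by
      push_neg
      exact ⟨by omega, by omega, by omega, by omega, by omega⟩
    rw [if_neg hguard]
    -- rewrite floordiv/mod to ediv/emod
    have hfd1 : PySem.Int.floordiv (var - 4 * n - 1) (n + 1) = d / m := by
      rw [PySem.Int.floordiv_eq_ediv_of_pos (by omega)]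
    have hmd1 : PySem.Int.mod (var - 4 * n - 1) (n + 1) = d % m := by
      rw [PySem.Int.mod_eq_emod_of_pos (by omega)]
    obtain ⟨e1, e2, e3, e4⟩ := mixed_radix d l m hl0 hmpos
    simp only [hfd1, hmd1]
    rw [PySem.Int.floordiv_eq_ediv_of_pos (by omega : (0:Int) < 11),
        PySem.Int.mod_eq_emod_of_pos (by omega : (0:Int) < 11),
        PySem.Int.floordiv_eq_ediv_of_pos hl0,
        PySem.Int.mod_eq_emod_of_pos hl0]
    exact Prod.ext (by rw [e4]) (Prod.ext (by rw [e3]) (Prod.ext (by rw [e2]) (by rw [e1])))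
  · rw [if_neg hcond]
    unfold variable_to_cell_alt
    simp only []
    have hguard : h ≤ 0 ∨ l ≤ 0 ∨ n + 1 ≤ 0 ∨ var - 4 * n - 1 < 0 ∨ h * l * 11 * (n + 1) ≤ var - 4 * n - 1 := by
      by_contra hg
      push_neg at hg
      obtain ⟨g1, g2, g3, g4, g5⟩ := hg
      apply hcond
      have hmaxh : max h 0 = h := by omega
      have hmaxl : max l 0 = l := by omega
      have hLm : L = m := by omega
      rw [hmaxh, hmaxl, hLm]
      have : h * (l * (11 * m)) = h * l * 11 * (n + 1) := by rw [hm]; ring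
      rw [this]
      omega
    rw [if_pos hguard]
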